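-- pv_equiv track=rewrite | github.com/Kimuksung/codewars-programmers | 프로그래머스-[3차] 방금그곡.py | change_str
-- ===== SOURCE A (Python) =====
-- def change_str(datas):
--     char_list = []
--     for idx,data in enumerate(datas) :
--         if data == '#':
--             continue
--         if idx < len(datas)-1 :
--             if datas[idx+1] == '#' :
--                 char_list.append(''.join(datas[idx:idx+2]))
--                 continue
--         char_list.append(data)
--
--     return char_list , len(char_list)
-- ===== SOURCE B (Python) =====
-- import re
--
-- def change_str(datas):
--     tokens = re.findall(r'[^#]#?', datas)
--     return tokens, len(tokens)
-- ===== Notes on version B (the rewrite author's own statement) =====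
-- stated objective: idiomatic
-- what changed: The index-based loop with manual lookahead (enumerate + datas[idx+1] + slice) is replaced by a single regex scan re.findall(r'[^#]#?') that tokenizes the string directly.
import Mathlib
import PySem

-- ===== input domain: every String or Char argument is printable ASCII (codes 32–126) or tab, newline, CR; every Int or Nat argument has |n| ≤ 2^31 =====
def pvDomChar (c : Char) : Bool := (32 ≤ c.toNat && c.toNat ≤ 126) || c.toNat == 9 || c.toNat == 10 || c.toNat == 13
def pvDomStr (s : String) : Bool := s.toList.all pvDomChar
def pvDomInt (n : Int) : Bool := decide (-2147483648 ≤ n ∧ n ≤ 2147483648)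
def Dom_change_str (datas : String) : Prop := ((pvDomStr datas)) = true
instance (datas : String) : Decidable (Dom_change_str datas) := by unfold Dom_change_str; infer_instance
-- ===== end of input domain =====

-- B replaces the index-based lookahead loop by a single left-to-right token scan
-- (in Python: one regex findall r'[^#]#?'); objective: idiomatic/simpler.

-- ===== PORT A =====
-- literal transliteration of A's enumerate loop with index lookahead;
-- string iteration/indexing/slicing is ported through datas.toList with PySem.List
-- primitives (exact: ''.join(datas[idx:idx+2]) is the two-char slice as a string).
def change_str (datas : String) : List String × Int :=
  let cs := datas.toList
  let char_list := (PySem.List.enumerate cs 0).foldl (fun acc p =>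
    if p.2 = '#' then acc
    else if p.1 < (cs.length : Int) - 1 then
      if PySem.List.pyGet? cs (p.1 + 1) = some '#' then
        acc ++ [String.ofList (PySem.List.slice cs (some p.1) (some (p.1 + 2)))]
      else acc ++ [String.ofList [p.2]]
    else acc ++ [String.ofList [p.2]]) []
  (char_list, (char_list.length : Int))

-- ===== PORT B =====
-- the regex scan r'[^#]#?': at a '#' no match starts (advance one);
-- otherwise consume the char and one optional following '#'.
def scanTokens : List Char → List String
  | [] => []
  | '#' :: rest => scanTokens rest
  | c :: '#' :: rest => String.ofList [c, '#'] :: scanTokens rest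
  | c :: rest => String.ofList [c] :: scanTokens rest

def change_str_alt (datas : String) : List String × Int :=
  let tokens := scanTokens datas.toList
  (tokens, (tokens.length : Int))

-- ===== PRECONDITION & SPEC =====
def Spec_change_str (datas : String) (out : List String × Int) : Prop := out = change_str_alt datas
instance (datas : String) (out : List String × Int) : Decidable (Spec_change_str datas out) := by unfold Spec_change_str; infer_instance

-- ===== CLAIM (what is proved, stated in full; the proofs are below) =====
def Claim_equal_change_str : Prop := ∀ (datas : String), Dom_change_str datas → Spec_change_str datas (change_str datas)

-- ===== LEMMAS AND PROOFS =====

lemma drop_succ_of_drop_cons {α : Type} {cs : List α} {k : Nat} {c : α} {l : List α}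
    (h : List.drop k cs = c :: l) : List.drop (k + 1) cs = l := by
  have := congrArg List.tail h
  simpa [List.tail_drop] using this

-- A's loop over the enumerated suffix of cs starting at index k equals B's scan of that suffix.
lemma loop_eq_scan (cs : List Char) (tl : List Char) (k : Nat) (acc : List String)
    (hdrop : List.drop k cs = tl) :
    (PySem.List.enumerate tl (k : Int)).foldl (fun acc p =>
      if p.2 = '#' then acc
      else if p.1 < (cs.length : Int) - 1 then
        if PySem.List.pyGet? cs (p.1 + 1) = some '#' then
          acc ++ [String.ofList (PySem.List.slice cs (some p.1) (some (p.1 + 2)))]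
        else acc ++ [String.ofList [p.2]]
      else acc ++ [String.ofList [p.2]]) acc
    = acc ++ scanTokens tl := by
  induction tl using scanTokens.induct generalizing k acc with
  | case1 =>
    simp [PySem.List.enumerate_nil, scanTokens]
  | case2 rest ih =>
    have hdrop' : List.drop (k + 1) cs = rest := drop_succ_of_drop_cons hdrop
    rw [PySem.List.enumerate_cons]
    simp only [List.foldl_cons, reduceIte]
    have : ((k : Int) + 1) = ((k + 1 : Nat) : Int) := by push_cast; ring
    rw [this, ih (k + 1) acc hdrop']
    simp [scanTokens]
  | case3 c rest hne ih =>
    -- tl = c :: '#' :: rest, c ≠ '#'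
    have hlen : cs.length = k + (rest.length + 2) := by
      have := congrArg List.length hdrop; simp at this; omega
    have hdrop1 : List.drop (k + 1) cs = '#' :: rest := drop_succ_of_drop_cons hdrop
    have hdrop2 : List.drop (k + 2) cs = rest := drop_succ_of_drop_cons hdrop1
    have hget : cs[k + 1]? = some '#' := by
      have : (List.drop (k+1) cs)[0]? = some '#' := by rw [hdrop1]; rfl
      simpa [List.getElem?_drop] using this
    have hslice : PySem.List.slice cs (some (k : Int)) (some ((k : Int) + 2)) = [c, '#'] := by
      have h2 : ((k : Int) + 2) = ((k : Int) + ((2 : Nat) : Int)) := by push_cast; ring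
      rw [h2, PySem.List.slice_natCast_add, hdrop]
      rfl
    rw [PySem.List.enumerate_cons, PySem.List.enumerate_cons]
    simp only [List.foldl_cons]
    rw [if_neg hne]
    have hklt : (k : Int) < (cs.length : Int) - 1 := by omega
    rw [if_pos hklt]
    have hget' : PySem.List.pyGet? cs ((k : Int) + 1) = some '#' := by
      have : ((k : Int) + 1) = ((k + 1 : Nat) : Int) := by push_cast; ring
      rw [this, PySem.List.pyGet?_natCast]; exact hget
    rw [if_pos hget', hslice]
    simp only [reduceIte]
    have : ((k : Int) + 1 + 1) = ((k + 2 : Nat) : Int) := by push_cast; ring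
    rw [this, ih (k + 2) _ hdrop2]
    simp [scanTokens]
  | case4 c rest hne hne2 ih =>
    -- tl = c :: rest, c ≠ '#', rest not starting with '#'
    have hlen : cs.length = k + (rest.length + 1) := by
      have := congrArg List.length hdrop; simp at this; omega
    have hdrop1 : List.drop (k + 1) cs = rest := drop_succ_of_drop_cons hdrop
    rw [PySem.List.enumerate_cons]
    simp only [List.foldl_cons]
    rw [if_neg hne]
    have hstep : (if (k : Int) < (cs.length : Int) - 1 then
        if PySem.List.pyGet? cs ((k : Int) + 1) = some '#' then
          acc ++ [String.ofList (PySem.List.slice cs (some (k : Int)) (some ((k : Int) + 2)))]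
        else acc ++ [String.ofList [c]]
      else acc ++ [String.ofList [c]]) = acc ++ [String.ofList [c]] := by
      by_cases hk : (k : Int) < (cs.length : Int) - 1
      · rw [if_pos hk]
        have hrest : rest ≠ [] := by
          intro h; subst h; simp at hlen; omega
        obtain ⟨d, rest', hr⟩ := List.exists_cons_of_ne_nil hrest
        have hd : d ≠ '#' := by
          intro h; exact hne2 rest' (by rw [hr, h])
        have hget : cs[k + 1]? = some d := by
          have : (List.drop (k+1) cs)[0]? = some d := by rw [hdrop1, hr]; rfl
          simpa [List.getElem?_drop] using this
        have : PySem.List.pyGet? cs ((k : Int) + 1) = some d := by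
          have hc : ((k : Int) + 1) = ((k + 1 : Nat) : Int) := by push_cast; ring
          rw [hc, PySem.List.pyGet?_natCast]; exact hget
        rw [if_neg (by rw [this]; simp [hd])]
      · rw [if_neg hk]
    rw [hstep]
    have : ((k : Int) + 1) = ((k + 1 : Nat) : Int) := by push_cast; ring
    rw [this, ih (k + 1) _ hdrop1]
    cases rest with
    | nil => simp [scanTokens]
    | cons d rest' =>
      have hd : d ≠ '#' := fun h => hne2 rest' (by rw [h])
      simp [scanTokens]

-- ===== VERDICT (by name: the statement is the Claim_ definition above) =====
theorem change_str_spec : Claim_equal_change_str := by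
  intro datas _
  unfold Spec_change_str change_str change_str_alt
  have h := loop_eq_scan datas.toList datas.toList 0 [] (by simp)
  simp only [Nat.cast_zero, List.nil_append] at h
  dsimp only
  rw [h]
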